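-- pv_equiv track=rewrite | github.com/liamtabrams/coding-challenges | leetcode problems/3323.py | minConnectedGroups
-- ===== SOURCE A (Python) =====
-- from typing import List
--
-- def minConnectedGroups(intervals: List[List[int]], k: int) -> int:
--     intervals.sort()
--
--     def merge(intervals):
--         res = []
--         for s, e in intervals:
--             if res and res[-1][1] >= s:
--                 res[-1][1] = max(res[-1][1], e)
--             else:
--                 res.append([s, e])
--         return res
--
--     intervals = merge(intervals)
--
--     groups = len(intervals)
--     res = groups
--
--     j = 0
--     for _, e in intervals:
--         while j < len(intervals) and e + k >= intervals[j][0]: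
--             groups -= 1
--             j += 1
--         groups += 1  # include the first interval
--         res = min(res, groups)
--     return res
-- ===== SOURCE B (Python) =====
-- from typing import List
--
-- def _bisect_right(a, x):
--     # hand-written bisect.bisect_right (A's module does not import bisect)
--     lo, hi = 0, len(a)
--     while lo < hi:
--         mid = (lo + hi) // 2
--         if a[mid] <= x:
--             lo = mid + 1
--         else:
--             hi = mid
--     return lo
--
-- def minConnectedGroups(intervals: List[List[int]], k: int) -> int:
--     intervals.sort()
--     merged = []
--     for iv in intervals:
--         s, e = iv
--         if merged and merged[-1][1] >= s:
--             merged[-1][1] = max(merged[-1][1], e)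
--         else:
--             merged.append([s, e])
--     n = len(merged)
--     starts = [iv[0] for iv in merged]
--     res = n
--     for i, iv in enumerate(merged):
--         e = iv[1]
--         f = _bisect_right(starts, e + k)
--         res = min(res, n - f + i + 1)
--     return res
-- ===== Notes on version B (the rewrite author's own statement) =====
-- stated objective: alternative
-- what changed: The stateful two-pointer sweep that maintains a running pointer j and a mutable groups counter is replaced by an independent per-interval binary search (bisect_right) over the merged starts with the closed formula n - f + i + 1.
import Mathlib
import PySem

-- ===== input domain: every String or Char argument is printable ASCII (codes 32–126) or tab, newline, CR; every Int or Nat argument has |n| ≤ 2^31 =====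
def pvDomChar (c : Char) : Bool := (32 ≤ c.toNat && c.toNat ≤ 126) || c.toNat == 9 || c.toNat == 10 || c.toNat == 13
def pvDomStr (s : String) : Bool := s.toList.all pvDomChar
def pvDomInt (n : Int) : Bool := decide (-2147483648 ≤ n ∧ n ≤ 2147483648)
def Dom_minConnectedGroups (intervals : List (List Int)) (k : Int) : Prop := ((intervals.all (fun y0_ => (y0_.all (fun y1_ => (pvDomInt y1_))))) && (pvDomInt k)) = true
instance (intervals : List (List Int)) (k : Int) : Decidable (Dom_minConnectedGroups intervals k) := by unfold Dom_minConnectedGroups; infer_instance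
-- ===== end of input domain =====

-- B replaces A's stateful two-pointer sweep by a per-interval binary search with a closed
-- count formula (objective: alternative, same cost class). Both Pythons sort `intervals`
-- in place (the same mutation); the equivalence proved here is about the return value.

-- ===== PORT A =====

-- one pass of A's inner `merge` loop; `res` is kept in REVERSE order (its head is
-- Python's res[-1]) and reversed back at the end of mergeA
def mergeStepA (res : List (List Int)) (iv : List Int) : List (List Int) :=
  match iv with
  | [s, e] =>
    match res with
    | [ps, pe] :: tl =>
      if pe ≥ s then [ps, max pe e] :: tl else [s, e] :: [ps, pe] :: tl
    | _ => [s, e] :: res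
  | _ => res      -- `s, e = iv` raises ValueError in Python; unreachable under Pre_

def mergeA (ivs : List (List Int)) : List (List Int) :=
  (ivs.foldl mergeStepA []).reverse

-- A's inner while loop: advances j, decrements groups
def whileA (merged : List (List Int)) (t : Int) (j : Nat) (groups : Int) : Nat × Int :=
  if h : j < merged.length ∧
      PySem.List.pyGetD (PySem.List.pyGetD merged (j : Int) []) 0 0 ≤ t then
    whileA merged t (j + 1) (groups - 1)
  else (j, groups)
termination_by merged.length - j
decreasing_by omega

-- A's outer for loop body; state = (j, groups, res)
def loopA (merged : List (List Int)) (k : Int) (st : Nat × Int × Int) (iv : List Int) :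
    Nat × Int × Int :=
  let e := PySem.List.pyGetD iv 1 0
  let p := whileA merged (e + k) st.1 st.2.1
  let groups := p.2 + 1
  (p.1, groups, min st.2.2 groups)

def minConnectedGroups (intervals : List (List Int)) (k : Int) : Int :=
  let ivs := PySem.List.sorted intervals (fun x => x) false
  let merged := mergeA ivs
  (merged.foldl (loopA merged k)
    (0, (merged.length : Int), (merged.length : Int))).2.2

-- ===== PORT B =====

-- B's merge loop is the same code as A's (Source B keeps it); transliterated separately
def mergeStepB (res : List (List Int)) (iv : List Int) : List (List Int) :=
  match iv with
  | [s, e] =>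
    match res with
    | [ps, pe] :: tl =>
      if pe ≥ s then [ps, max pe e] :: tl else [s, e] :: [ps, pe] :: tl
    | _ => [s, e] :: res
  | _ => res

def mergeB (ivs : List (List Int)) : List (List Int) :=
  (ivs.foldl mergeStepB []).reverse

-- Source B's _bisect_right is verbatim CPython bisect_right; ported as PySem.List.bisectRight
def minConnectedGroups_alt (intervals : List (List Int)) (k : Int) : Int :=
  let ivs := PySem.List.sorted intervals (fun x => x) false
  let merged := mergeB ivs
  let n : Int := merged.length
  let starts := merged.map (fun iv => PySem.List.pyGetD iv 0 0)
  (PySem.List.enumerate merged 0).foldl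
    (fun res p =>
      let e := PySem.List.pyGetD p.2 1 0
      let f := PySem.List.bisectRight starts (e + k)
      min res (n - (f : Int) + p.1 + 1)) n

-- ===== PRECONDITION & SPEC =====
-- Pre_ excludes exactly the inputs where A raises: an inner list whose length is not 2
-- makes Python's `for s, e in intervals` unpacking raise ValueError.
def Pre_minConnectedGroups (intervals : List (List Int)) (k : Int) : Prop :=
  ∀ iv ∈ intervals, iv.length = 2
instance (intervals : List (List Int)) (k : Int) : Decidable (Pre_minConnectedGroups intervals k) := by
  unfold Pre_minConnectedGroups; infer_instance

def pvWitness_minConnectedGroups : List (List Int) × Int := ([[1, 2], [5, 6], [-3, 0]], 1)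

def Spec_minConnectedGroups (intervals : List (List Int)) (k : Int) (out : Int) : Prop := out = minConnectedGroups_alt intervals k
instance (intervals : List (List Int)) (k : Int) (out : Int) : Decidable (Spec_minConnectedGroups intervals k out) := by unfold Spec_minConnectedGroups; infer_instance

-- ===== CLAIM (what is proved, stated in full; the proofs are below) =====
def Claim_equal_minConnectedGroups : Prop := ∀ (intervals : List (List Int)) (k : Int), Dom_minConnectedGroups intervals k → Pre_minConnectedGroups intervals k → Spec_minConnectedGroups intervals k (minConnectedGroups intervals k)

-- ===== LEMMAS AND PROOFS =====

-- the start (index-0 entry) of an interval, as both ports read it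
def pvHd (iv : List Int) : Int := PySem.List.pyGetD iv 0 0

@[simp] theorem pvHd_pair (a b : Int) : pvHd [a, b] = a := by
  simp [pvHd]

theorem mergeB_eq_mergeA (ivs : List (List Int)) : mergeB ivs = mergeA ivs := rfl

-- list-lex ≤ on two length-2 lists is monotone in the head
theorem head_mono (a b : List Int) (ha : a.length = 2) (hb : b.length = 2)
    (h : a ≤ b) : pvHd a ≤ pvHd b := by
  match a, ha, b, hb with
  | [s1, e1], _, [s2, e2], _ =>
    simp only [pvHd, PySem.List.pyGetD_zero_cons]
    by_contra hc
    have hlt : ([s2, e2] : List Int) < [s1, e1] :=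
      List.cons_lt_cons_iff.2 (Or.inl (by omega))
    exact absurd h (not_le_of_gt hlt)

theorem sorted_pairwise_le (xs : List (List Int)) :
    List.Pairwise (fun a b => a ≤ b) (PySem.List.sorted xs (fun x => x) false) := by
  have h := PySem.List.sorted_pairwise (κ := List Int) xs (fun x => x)
  convert h using 2

-- merge invariant: shapes stay length-2 and the starts of the (reversed) accumulator
-- are non-increasing going left (so non-decreasing in output order)
theorem merge_inv (l : List (List Int)) :
    ∀ (acc : List (List Int)),
    (∀ iv ∈ l, iv.length = 2) →
    (∀ iv ∈ acc, iv.length = 2) →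
    List.Pairwise (fun a b => a ≤ b) l →
    List.Pairwise (fun a b => pvHd b ≤ pvHd a) acc →
    (∀ x ∈ l, ∀ a ∈ acc, pvHd a ≤ pvHd x) →
    (∀ iv ∈ l.foldl mergeStepA acc, iv.length = 2) ∧
      List.Pairwise (fun a b => pvHd b ≤ pvHd a) (l.foldl mergeStepA acc) := by
  induction l with
  | nil => intro acc _ hacc _ hpacc _; exact ⟨hacc, hpacc⟩
  | cons x t ih =>
    intro acc hl hacc hpl hpacc hcross
    obtain ⟨s, e, rfl⟩ : ∃ s e, x = [s, e] := by
      have hx := hl x (by simp)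
      match x, hx with
      | [s, e], _ => exact ⟨s, e, rfl⟩
    have hlt : ∀ iv ∈ t, iv.length = 2 := fun iv hi => hl iv (List.mem_cons_of_mem _ hi)
    have hplt : List.Pairwise (fun a b => a ≤ b) t := hpl.of_cons
    have hheadle : ∀ y ∈ t, s ≤ pvHd y := by
      intro y hy
      have := (List.pairwise_cons.1 hpl).1 y hy
      simpa using head_mono [s, e] y (by simp) (hlt y hy) this
    rw [List.foldl_cons]
    match acc, hacc, hpacc with
    | [], _, _ =>
      apply ih [[s, e]] hlt (by intro iv hi; simp at hi; simp [hi]) hplt (by simp)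
      intro y hy a ha
      simp at ha
      subst ha
      simpa using hheadle y hy
    | a :: tl, hacc, hpacc =>
      obtain ⟨ps, pe, rfl⟩ : ∃ ps pe, a = [ps, pe] := by
        have ha := hacc a (by simp)
        match a, ha with
        | [ps, pe], _ => exact ⟨ps, pe, rfl⟩
      have htl2 : ∀ iv ∈ tl, iv.length = 2 := fun iv hi => hacc iv (by simp [hi])
      show _ ∧ List.Pairwise _ (t.foldl mergeStepA (mergeStepA ([ps, pe] :: tl) [s, e]))
      by_cases hc : pe ≥ s
      · have hms : mergeStepA ([ps, pe] :: tl) [s, e] = [ps, max pe e] :: tl := by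
          simp [mergeStepA, hc]
        rw [hms]
        apply ih _ hlt
        · intro iv hi
          rcases List.mem_cons.1 hi with h | h
          · simp [h]
          · exact htl2 iv h
        · exact hplt
        · refine List.pairwise_cons.2 ⟨?_, hpacc.of_cons⟩
          intro b hb
          have := (List.pairwise_cons.1 hpacc).1 b hb
          simpa using this
        · intro y hy b hb
          rcases List.mem_cons.1 hb with h | h
          · subst h
            simpa using hcross y (List.mem_cons_of_mem _ hy) [ps, pe] (by simp)
          · exact hcross y (List.mem_cons_of_mem _ hy) b (by simp [h])
      · have hms : mergeStepA ([ps, pe] :: tl) [s, e] = [s, e] :: [ps, pe] :: tl := by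
          simp [mergeStepA, hc]
        rw [hms]
        apply ih _ hlt
        · intro iv hi
          rcases List.mem_cons.1 hi with h | h
          · simp [h]
          · exact hacc iv h
        · exact hplt
        · refine List.pairwise_cons.2 ⟨?_, hpacc⟩
          intro b hb
          have := hcross [s, e] (by simp) b hb
          simpa using this
        · intro y hy b hb
          rcases List.mem_cons.1 hb with h | h
          · subst h
            simpa using hheadle y hy
          · exact hcross y (List.mem_cons_of_mem _ hy) b h

-- prefix characterisation of countP on a sorted list
theorem countP_prefix (a : List Int) (x : Int)
    (hp : List.Pairwise (fun p q => p ≤ q) a) :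
    ∀ i (h : i < a.length), (a[i] ≤ x ↔ i < a.countP (fun s => decide (s ≤ x))) := by
  induction a with
  | nil => intro i h; simp at h
  | cons hd t ih =>
    intro i hi
    rw [List.countP_cons]
    by_cases hx : hd ≤ x
    · cases i with
      | zero => simp [hx]
      | succ i =>
        have := ih hp.of_cons i (by simpa using hi)
        simpa [hx] using this
    · have hall : ∀ y ∈ t, ¬ y ≤ x := by
        intro y hy hyx
        exact hx (le_trans ((List.pairwise_cons.1 hp).1 y hy) hyx)
      have hz : t.countP (fun s => decide (s ≤ x)) = 0 := by
        rw [List.countP_eq_zero]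
        intro y hy
        simpa using hall y hy
      cases i with
      | zero => simp [hx, hz]
      | succ i =>
        have hit : i < t.length := by simpa using hi
        have hm : t[i] ∈ t := List.getElem_mem hit
        simp [hx, hz, hall t[i] hm]

theorem bisect_eq_countP (a : List Int) (x : Int)
    (hp : List.Pairwise (fun p q => p ≤ q) a) :
    PySem.List.bisectRight a x = a.countP (fun s => decide (s ≤ x)) := by
  obtain ⟨hb1, hb2, hb3⟩ := PySem.List.bisectRight_spec a x hp
  have hc : a.countP (fun s => decide (s ≤ x)) ≤ a.length := List.countP_le_length
  rcases lt_trichotomy (PySem.List.bisectRight a x) (a.countP (fun s => decide (s ≤ x))) with h | h | h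
  · have hblen : PySem.List.bisectRight a x < a.length := lt_of_lt_of_le h hc
    have h1 := hb3 _ hblen le_rfl
    have h2 := (countP_prefix a x hp _ hblen).2 h
    omega
  · exact h
  · have hclen : a.countP (fun s => decide (s ≤ x)) < a.length := lt_of_lt_of_le h hb1
    have h1 := hb2 _ hclen h
    have h2 := (countP_prefix a x hp _ hclen).1 h1
    omega

-- A's while loop advances j to max j c where c counts the starts ≤ t
theorem whileA_spec (merged : List (List Int)) (t : Int)
    (hp : List.Pairwise (fun p q => p ≤ q) (merged.map pvHd)) :
    ∀ (j : Nat) (groups : Int),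
      whileA merged t j groups =
        (max j ((merged.map pvHd).countP (fun s => decide (s ≤ t))),
         groups - ((max j ((merged.map pvHd).countP (fun s => decide (s ≤ t))) : Int) - (j : Int))) := by
  have hc : (merged.map pvHd).countP (fun s => decide (s ≤ t)) ≤ merged.length := by
    have := List.countP_le_length (p := fun s => decide (s ≤ t)) (l := merged.map pvHd)
    simpa using this
  have hcond : ∀ (j : Nat), j < merged.length →
      (PySem.List.pyGetD (PySem.List.pyGetD merged (j : Int) []) 0 0 ≤ t ↔
        j < (merged.map pvHd).countP (fun s => decide (s ≤ t))) := by
    intro j hj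
    have hjm : j < (merged.map pvHd).length := by simpa using hj
    have h1 : PySem.List.pyGetD merged (j : Int) [] = merged[j] := by
      rw [PySem.List.pyGetD_natCast]
      exact List.getD_eq_getElem merged [] hj
    have h2 : (merged.map pvHd)[j]'hjm = pvHd (merged[j]'hj) := by simp
    have h3 := countP_prefix (merged.map pvHd) t hp j hjm
    rw [h1]
    rw [h2] at h3
    simpa [pvHd] using h3
  have H : ∀ (n j : Nat) (groups : Int), merged.length - j ≤ n →
      whileA merged t j groups =
        (max j ((merged.map pvHd).countP (fun s => decide (s ≤ t))),
         groups - ((max j ((merged.map pvHd).countP (fun s => decide (s ≤ t))) : Int) - (j : Int))) := by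
    intro n
    induction n with
    | zero =>
      intro j groups hle
      rw [whileA]
      rw [dif_neg (by omega)]
      refine Prod.ext (by omega) ?_
      push_cast
      omega
    | succ n ihn =>
      intro j groups hle
      rw [whileA]
      by_cases hcj : j < merged.length ∧
          PySem.List.pyGetD (PySem.List.pyGetD merged (j : Int) []) 0 0 ≤ t
      · rw [dif_pos hcj]
        rw [ihn (j + 1) (groups - 1) (by omega)]
        have hjc : j < (merged.map pvHd).countP (fun s => decide (s ≤ t)) :=
          (hcond j hcj.1).1 hcj.2
        have hmax1 : max (j + 1) ((merged.map pvHd).countP (fun s => decide (s ≤ t))) =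
            max j ((merged.map pvHd).countP (fun s => decide (s ≤ t))) := by omega
        rw [hmax1]
        refine Prod.ext rfl ?_
        have : max j ((merged.map pvHd).countP (fun s => decide (s ≤ t))) =
            (merged.map pvHd).countP (fun s => decide (s ≤ t)) := by omega
        rw [this]
        push_cast
        omega
      · rw [dif_neg hcj]
        have hjc : (merged.map pvHd).countP (fun s => decide (s ≤ t)) ≤ j := by
          by_cases hj : j < merged.length
          · have hnc : ¬ PySem.List.pyGetD (PySem.List.pyGetD merged (j : Int) []) 0 0 ≤ t :=
              fun hcc => hcj ⟨hj, hcc⟩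
            have := mt (hcond j hj).2 hnc
            omega
          · omega
        refine Prod.ext (by omega) ?_
        push_cast
        omega
  exact fun j groups => H (merged.length - j) j groups le_rfl

-- the main loop correspondence
theorem mainFold (merged : List (List Int)) (k : Int)
    (hp : List.Pairwise (fun p q => p ≤ q) (merged.map pvHd)) :
    ∀ (rest : List (List Int)) (i j : Nat) (resA resB : Int),
      j ≤ merged.length →
      resA = resB →
      resA ≤ (merged.length : Int) - (j : Int) + (i : Int) →
      (rest.foldl (loopA merged k)
          (j, (merged.length : Int) - (j : Int) + (i : Int), resA)).2.2 =
        (PySem.List.enumerate rest (i : Int)).foldl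
          (fun res p =>
            let e := PySem.List.pyGetD p.2 1 0
            let f := PySem.List.bisectRight (merged.map pvHd) (e + k)
            min res ((merged.length : Int) - (f : Int) + p.1 + 1)) resB := by
  intro rest
  induction rest with
  | nil =>
    intro i j resA resB hj hres hble
    simpa [PySem.List.enumerate] using hres
  | cons iv t ih =>
    intro i j resA resB hj hres hble
    have henum : PySem.List.enumerate (iv :: t) (i : Int) =
        ((i : Int), iv) :: PySem.List.enumerate t ((i : Int) + 1) := by
      simp [PySem.List.enumerate]
    rw [List.foldl_cons, henum, List.foldl_cons]
    have hc : (merged.map pvHd).countP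
        (fun s => decide (s ≤ PySem.List.pyGetD iv 1 0 + k)) ≤ merged.length := by
      have := List.countP_le_length
        (p := fun s => decide (s ≤ PySem.List.pyGetD iv 1 0 + k)) (l := merged.map pvHd)
      simpa using this
    have hstep : loopA merged k (j, (merged.length : Int) - (j : Int) + (i : Int), resA) iv =
        (max j ((merged.map pvHd).countP (fun s => decide (s ≤ PySem.List.pyGetD iv 1 0 + k))),
         (merged.length : Int) -
           ((max j ((merged.map pvHd).countP (fun s => decide (s ≤ PySem.List.pyGetD iv 1 0 + k))) : Int)) +
           ((i : Int) + 1),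
         min resA ((merged.length : Int) -
           ((max j ((merged.map pvHd).countP (fun s => decide (s ≤ PySem.List.pyGetD iv 1 0 + k))) : Int)) +
           ((i : Int) + 1))) := by
      simp only [loopA, whileA_spec merged _ hp]
      refine Prod.ext rfl (Prod.ext (by dsimp only; omega) (by dsimp only; omega))
    rw [hstep]
    have hbis : PySem.List.bisectRight (merged.map pvHd) (PySem.List.pyGetD iv 1 0 + k) =
        (merged.map pvHd).countP (fun s => decide (s ≤ PySem.List.pyGetD iv 1 0 + k)) :=
      bisect_eq_countP _ _ hp
    have hrhs : (let e := PySem.List.pyGetD ((i : Int), iv).2 1 0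
          let f := PySem.List.bisectRight (merged.map pvHd) (e + k)
          min resB ((merged.length : Int) - (f : Int) + ((i : Int), iv).1 + 1)) =
        min resB ((merged.length : Int) -
          (((merged.map pvHd).countP (fun s => decide (s ≤ PySem.List.pyGetD iv 1 0 + k)) : Int)) +
          (i : Int) + 1) := by
      simp only [hbis]
    rw [hrhs]
    have happ := ih (i + 1)
      (max j ((merged.map pvHd).countP (fun s => decide (s ≤ PySem.List.pyGetD iv 1 0 + k))))
      (min resA ((merged.length : Int) -
        ((max j ((merged.map pvHd).countP (fun s => decide (s ≤ PySem.List.pyGetD iv 1 0 + k))) : Int)) +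
        ((i : Int) + 1)))
      (min resB ((merged.length : Int) -
        (((merged.map pvHd).countP (fun s => decide (s ≤ PySem.List.pyGetD iv 1 0 + k)) : Int)) +
        (i : Int) + 1))
      (by omega) (by omega) (by push_cast; omega)
    have hcast : ((i + 1 : Nat) : Int) = (i : Int) + 1 := by push_cast; ring
    rw [hcast] at happ
    push_cast at happ ⊢
    exact happ

-- ===== VERDICT (by name: the statement is the Claim_ definition above) =====
theorem minConnectedGroups_spec : Claim_equal_minConnectedGroups := by
  intro intervals k _hdom hpre
  unfold Spec_minConnectedGroups
  simp only [minConnectedGroups, minConnectedGroups_alt, mergeB_eq_mergeA]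
  have hS2 : ∀ iv ∈ PySem.List.sorted intervals (fun x => x) false, iv.length = 2 :=
    fun iv h => hpre iv ((PySem.List.mem_sorted intervals (fun x => x) false iv).1 h)
  have hSp := sorted_pairwise_le intervals
  have hinv := merge_inv (PySem.List.sorted intervals (fun x => x) false) [] hS2
    (by simp) hSp (by simp) (by simp)
  have hpm : List.Pairwise (fun a b => pvHd a ≤ pvHd b)
      (mergeA (PySem.List.sorted intervals (fun x => x) false)) := by
    unfold mergeA
    exact List.pairwise_reverse.2 hinv.2
  have hst : List.Pairwise (fun p q => p ≤ q)
      ((mergeA (PySem.List.sorted intervals (fun x => x) false)).map pvHd) :=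
    List.pairwise_map.2 hpm
  have hmain := mainFold (mergeA (PySem.List.sorted intervals (fun x => x) false)) k hst
    (mergeA (PySem.List.sorted intervals (fun x => x) false)) 0 0
    ((mergeA (PySem.List.sorted intervals (fun x => x) false)).length : Int)
    ((mergeA (PySem.List.sorted intervals (fun x => x) false)).length : Int)
    (by omega) rfl (by omega)
  simpa [pvHd] using hmain
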